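-- pv_equiv track=rewrite | github.com/jwrickman/UglyDuckling19 | dataset_prep/pipeline.py | separate_by_patient
-- ===== SOURCE A (Python) =====
-- def separate_by_patient(filenames, pos=[64, 67]):
--     """ Split list of '.record' filenames into a dict of lists of diff patients
--
--     Splits list of filenames into a dictionary of patient_id: patient_files.
--     Splits based on patient id (pid) in filename between pos[0] and pos[2].
--
--     Parameters:
--         filenames (string[]): A list of '.record' filenames, with patient pid
--             between pos[0] and pos[1].
--         pos (int[2]): A length 2 list with the 0th index corresponding to
--             the beginning index of the pid in the filename, and the 1st index
--             corresponding to the ending index of the pid in the filename.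
--     Returns:
--         patient_dict (dict of int: string[]): A dictinary mapping pids to
--             corresponding '.record' filenames.
--     """
--     patient_dict = {}
--     for name in filenames:
--         pid = ''.join(ch for ch in name[pos[0]:pos[1]] if ch.isdigit())
--         if pid in patient_dict:
--             patient_dict[pid].append(name)
--         else:
--             patient_dict[pid] = [name]
--     return patient_dict
-- ===== SOURCE B (Python) =====
-- def separate_by_patient(filenames, pos=[64, 67]):
--     """Group '.record' filenames by patient id via key extraction + two passes."""
--     def key(name):
--         return ''.join(ch for ch in name[pos[0]:pos[1]] if ch.isdigit())
--     pids = list(dict.fromkeys(map(key, filenames)))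
--     return {pid: [name for name in filenames if key(name) == pid] for pid in pids}
-- ===== Notes on version B (the rewrite author's own statement) =====
-- stated objective: alternative
-- what changed: B replaces A's incremental dict build (lookup-then-append per filename) by a two-pass scheme: first collect the distinct patient ids in first-occurrence order with dict.fromkeys, then build each group in one comprehension filtering the filename list by key.
import Mathlib
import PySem

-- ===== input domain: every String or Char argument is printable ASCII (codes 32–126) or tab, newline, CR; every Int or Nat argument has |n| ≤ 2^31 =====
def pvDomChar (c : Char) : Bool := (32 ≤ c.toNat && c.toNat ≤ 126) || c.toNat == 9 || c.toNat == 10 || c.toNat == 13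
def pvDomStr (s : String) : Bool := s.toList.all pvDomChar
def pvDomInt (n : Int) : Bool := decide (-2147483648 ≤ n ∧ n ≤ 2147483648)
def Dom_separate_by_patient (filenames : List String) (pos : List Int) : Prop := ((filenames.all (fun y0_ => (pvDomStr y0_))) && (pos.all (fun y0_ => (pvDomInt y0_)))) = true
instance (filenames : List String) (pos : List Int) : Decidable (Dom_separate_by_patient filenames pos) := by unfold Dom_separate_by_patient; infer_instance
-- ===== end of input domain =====

-- B groups by first collecting the distinct patient ids (dict.fromkeys) and then filtering the
-- filename list once per id, instead of A's incremental dict of growing lists; same result, alternative decomposition.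


-- shared helper: pid = ''.join(ch for ch in name[pos[0]:pos[1]] if ch.isdigit())
-- (the identical expression occurs verbatim in both Pythons; pyGetD's default is never
-- reached under Pre_, which guarantees pos[0]/pos[1] exist whenever this is evaluated)
def pvPid (pos : List Int) (name : String) : String :=
  String.ofList ((PySem.Str.slice name (some (PySem.List.pyGetD pos 0 0))
      (some (PySem.List.pyGetD pos 1 0))).toList.filter PySem.Chars.isdigit)

-- ===== PORT A =====
def separate_by_patient (filenames : List String) (pos : List Int) : List (String × List String) :=
  (filenames.foldl
    (fun patient_dict name =>
      let pid := pvPid pos name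
      if patient_dict.contains pid then
        patient_dict.insert pid (patient_dict.getD pid [] ++ [name])
      else
        patient_dict.insert pid [name])
    PySem.Dict.empty).items

-- ===== PORT B =====
def separate_by_patient_alt (filenames : List String) (pos : List Int) : List (String × List String) :=
  (PySem.List.dedup (filenames.map (pvPid pos))).map
    (fun pid => (pid, filenames.filter (fun name => pvPid pos name == pid)))

-- ===== PRECONDITION & SPEC =====
-- A evaluates pos[0]/pos[1] once per filename: it raises IndexError iff filenames ≠ [] and len(pos) < 2.
def Pre_separate_by_patient (filenames : List String) (pos : List Int) : Prop :=
  filenames = [] ∨ 2 ≤ pos.length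
instance (filenames : List String) (pos : List Int) : Decidable (Pre_separate_by_patient filenames pos) := by unfold Pre_separate_by_patient; infer_instance

def pvWitness_separate_by_patient : List String × List Int :=
  (["a01x.record", "a02y.record", "a01z.record"], [1, 3])

def Spec_separate_by_patient (filenames : List String) (pos : List Int) (out : List (String × List String)) : Prop := out = separate_by_patient_alt filenames pos
instance (filenames : List String) (pos : List Int) (out : List (String × List String)) : Decidable (Spec_separate_by_patient filenames pos out) := by unfold Spec_separate_by_patient; infer_instance

-- ===== CLAIM (what is proved, stated in full; the proofs are below) =====
def Claim_equal_separate_by_patient : Prop := ∀ (filenames : List String) (pos : List Int), Dom_separate_by_patient filenames pos → Pre_separate_by_patient filenames pos → Spec_separate_by_patient filenames pos (separate_by_patient filenames pos)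

-- ===== LEMMAS AND PROOFS =====

-- A's loop body, with the insert pulled out of the branch (both branches insert at the same key).
theorem pvStep_eq (f : String → String) :
    (fun (d : PySem.Dict String (List String)) name =>
      if d.contains (f name) then d.insert (f name) (d.getD (f name) [] ++ [name])
      else d.insert (f name) [name])
    = (fun d name => d.insert (f name)
        (if d.contains (f name) then d.getD (f name) [] ++ [name] else [name])) := by
  funext d n
  by_cases h : d.contains (f n) <;> simp [h]

-- The dict A builds, read as items, is exactly B's dedup-then-filter grouping.
theorem pvFold_items (f : String → String) (l : List String) :
    (l.foldl
      (fun d name => d.insert (f name)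
        (if d.contains (f name) then d.getD (f name) [] ++ [name] else [name]))
      PySem.Dict.empty).items
    = (PySem.List.dedup (l.map f)).map
        (fun pid => (pid, l.filter (fun name => f name == pid))) := by
  induction l using List.reverseRecOn with
  | nil => rfl
  | append_singleton l x ih =>
    rw [List.foldl_append, List.foldl_cons, List.foldl_nil]
    set d := l.foldl
      (fun d name => d.insert (f name)
        (if d.contains (f name) then d.getD (f name) [] ++ [name] else [name]))
      PySem.Dict.empty with hd
    have hkeys : d.keys = PySem.Set.ofList (l.map f) := by
      rw [hd, PySem.Dict.keys_foldl_insert_key, PySem.Dict.keys_empty,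
        PySem.Set.update_nil_left]
    have hnd : d.keys.Nodup :=
      PySem.Dict.nodup_keys_foldl_insert_key l f _ _ PySem.Dict.nodup_keys_empty
    rw [List.map_append, List.map_cons, List.map_nil, PySem.List.dedup_eq_ofList,
      PySem.Set.ofList_append_singleton]
    by_cases hx : f x ∈ l.map f
    · have hc : d.contains (f x) = true := by
        rw [PySem.Dict.contains_iff_mem_keys, hkeys, PySem.Set.mem_ofList]; exact hx
      have hmemI : (f x, l.filter (fun name => f name == f x)) ∈ d.items := by
        rw [ih]
        exact List.mem_map.mpr ⟨f x, by simp [PySem.Set.mem_ofList, hx], rfl⟩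
      have hget : d.getD (f x) [] = l.filter (fun name => f name == f x) :=
        PySem.Dict.getD_of_mem_items d hmemI hnd []
      rw [hc, if_pos rfl, PySem.Dict.items_insert_of_contains d _ hc, ih, hget,
        PySem.Set.add_of_mem (by rwa [PySem.Set.mem_ofList]), List.map_map]
      refine List.map_congr_left ?_
      intro k _
      by_cases hk : k = f x
      · subst hk; simp [List.filter_append]
      · have : (f x == k) = false := by simp; exact fun h => hk h.symm
        simp [Function.comp, List.filter_append, this, beq_iff_eq,
          fun h : k = f x => hk h]
    · have hc : d.contains (f x) = false := by
        rw [Bool.eq_false_iff]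
        intro h
        exact hx
          (by rwa [PySem.Dict.contains_iff_mem_keys, hkeys, PySem.Set.mem_ofList] at h)
      have hnil : l.filter (fun name => f name == f x) = [] := by
        rw [List.filter_eq_nil_iff]
        intro n hn hbeq
        exact hx (List.mem_map.mpr ⟨n, hn, eq_of_beq hbeq⟩)
      rw [hc, if_neg (by simp), PySem.Dict.items_insert_of_not_contains d _ hc, ih,
        PySem.Set.add_of_not_mem (by rwa [PySem.Set.mem_ofList]), List.map_append]
      congr 1
      · refine List.map_congr_left ?_
        intro k hk
        have hk' : k ∈ l.map f := (PySem.Set.mem_ofList _ _).mp hk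
        have : (f x == k) = false := by
          simp; intro h; exact hx (h ▸ hk')
        simp [List.filter_append, this]
      · simp [List.filter_append, hnil]

-- ===== VERDICT (by name: the statement is the Claim_ definition above) =====
theorem separate_by_patient_spec : Claim_equal_separate_by_patient := by
  intro filenames pos _hDom _hPre
  show separate_by_patient filenames pos = separate_by_patient_alt filenames pos
  unfold separate_by_patient separate_by_patient_alt
  rw [PySem.List.dedup_eq_ofList] at *
  rw [pvStep_eq (pvPid pos)]
  have := pvFold_items (pvPid pos) filenames
  rwa [PySem.List.dedup_eq_ofList] at this
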